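-- pv_equiv track=rewrite | github.com/as20203/thesis-tests | hide-text/hide-bits-paragraph.py | encode_bit_sequence
-- ===== SOURCE A (Python) =====
-- def encode_bit_sequence(text, bit_sequence):
--     encoded_text = ""
--     bit_index = 0
--     for char in text:
--         if char == ' ':
--             # Encode the current bit within the space character
--             encoded_char = char
--             if bit_index < len(bit_sequence):
--                 if bit_sequence[bit_index] == '1':
--                     # Set the LSB of the ASCII value of space to '1'
--                     encoded_char = chr(ord(char) | 1)
--                 else:
--                     # Set the LSB of the ASCII value of space to '0'
--                     encoded_char = chr(ord(char) & ~1)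
--                 bit_index += 1
--         else:
--             encoded_char = char
--         encoded_text += encoded_char
--     return encoded_text
-- ===== SOURCE B (Python) =====
-- def encode_bit_sequence(text, bit_sequence):
--     chars = list(text)
--     space_positions = [i for i, c in enumerate(chars) if c == ' ']
--     for bit, pos in zip(bit_sequence, space_positions):
--         chars[pos] = chr(ord(' ') | 1) if bit == '1' else chr(ord(' ') & ~1)
--     return ''.join(chars)
-- ===== Notes on version B (the rewrite author's own statement) =====
-- stated objective: alternative
-- what changed: Replaces A's single interleaved loop with a running bit counter and incremental string building by a build-index-then-apply structure: one pass collects the indices of all space characters, then zip(bit_sequence, positions) writes each encoded bit directly into a character list which is joined once.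
import Mathlib
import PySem

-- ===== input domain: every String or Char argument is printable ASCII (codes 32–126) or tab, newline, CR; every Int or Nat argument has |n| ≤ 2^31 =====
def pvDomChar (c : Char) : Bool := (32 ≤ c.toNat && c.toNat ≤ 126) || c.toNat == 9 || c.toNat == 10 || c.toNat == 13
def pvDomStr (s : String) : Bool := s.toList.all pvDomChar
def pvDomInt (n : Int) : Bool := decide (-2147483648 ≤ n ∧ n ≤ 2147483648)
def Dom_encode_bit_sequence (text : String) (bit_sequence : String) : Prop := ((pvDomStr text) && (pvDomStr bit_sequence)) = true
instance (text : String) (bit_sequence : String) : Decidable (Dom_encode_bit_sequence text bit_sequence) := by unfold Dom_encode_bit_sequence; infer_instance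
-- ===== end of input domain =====

-- B replaces A's single interleaved loop (bit counter + string concatenation) by a
-- build-index-then-apply structure: collect the space indices, then write each bit
-- of zip(bits, positions) into the character list and join once (objective: alternative).

-- ===== PORT A =====
-- one loop step of A: state = (encoded_text as List Char, bit_index)
def pvStepA (bits : List Char) (st : List Char × Nat) (c : Char) : List Char × Nat :=
  if c = ' ' then
    if st.2 < bits.length then
      (st.1 ++ [if bits.getD st.2 ' ' = '1'
                then Char.ofNat (c.toNat ||| 1)                       -- chr(ord(char) | 1)
                else Char.ofNat (Int.toNat (Int.land (c.toNat : Int) (-2)))], -- chr(ord(char) & ~1); ~1 = -2 on Python ints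
       st.2 + 1)
    else (st.1 ++ [c], st.2)
  else (st.1 ++ [c], st.2)

def encode_bit_sequence (text : String) (bit_sequence : String) : String :=
  String.mk (text.toList.foldl (pvStepA bit_sequence.toList) ([], 0)).1

-- ===== PORT B =====
-- the comprehension [i for i, c in enumerate(chars) if c == ' '] as structural recursion
def pvSpacePositions : List Char → List Nat
  | [] => []
  | c :: cs =>
    if c = ' ' then 0 :: (pvSpacePositions cs).map (· + 1)
    else (pvSpacePositions cs).map (· + 1)

-- the for-loop over zip(bit_sequence, positions), mutating the char list
def pvApplyBits (cs : List Char) (pairs : List (Char × Nat)) : List Char :=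
  pairs.foldl
    (fun acc bp =>
      acc.set bp.2 (if bp.1 = '1'
                    then Char.ofNat ((' ').toNat ||| 1)
                    else Char.ofNat (Int.toNat (Int.land ((' ').toNat : Int) (-2)))))
    cs

def encode_bit_sequence_alt (text : String) (bit_sequence : String) : String :=
  String.mk (pvApplyBits text.toList (bit_sequence.toList.zip (pvSpacePositions text.toList)))

-- ===== PRECONDITION & SPEC =====
def Spec_encode_bit_sequence (text : String) (bit_sequence : String) (out : String) : Prop := out = encode_bit_sequence_alt text bit_sequence
instance (text : String) (bit_sequence : String) (out : String) : Decidable (Spec_encode_bit_sequence text bit_sequence out) := by unfold Spec_encode_bit_sequence; infer_instance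

-- ===== CLAIM (what is proved, stated in full; the proofs are below) =====
def Claim_equal_encode_bit_sequence : Prop := ∀ (text : String) (bit_sequence : String), Dom_encode_bit_sequence text bit_sequence → Spec_encode_bit_sequence text bit_sequence (encode_bit_sequence text bit_sequence)

-- ===== LEMMAS AND PROOFS =====

-- common reference function: encode cs against the remaining bit list
def pvEnc : List Char → List Char → List Char
  | [], _ => []
  | c :: cs, bits =>
    if c = ' ' then
      match bits with
      | [] => c :: pvEnc cs []
      | b :: bs => (if b = '1' then '!' else ' ') :: pvEnc cs bs
    else c :: pvEnc cs bits

lemma pvEnc_nil_bits (cs : List Char) : pvEnc cs [] = cs := by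
  induction cs with
  | nil => rfl
  | cons c cs ih => by_cases hc : c = ' ' <;> simp [pvEnc, hc, ih]

lemma pvLdiff : Nat.ldiff 32 1 = 32 := by
  apply Nat.eq_of_testBit_eq
  intro i
  rw [Nat.testBit_ldiff]
  rcases i with _|_|_|_|_|_|i <;> simp [Nat.testBit_succ]

lemma pvCharOr : Char.ofNat ((' ').toNat ||| 1) = '!' := by decide

lemma pvCharAnd : Char.ofNat (Int.toNat (Int.land (32 : Int) (-2))) = ' ' := by
  show Char.ofNat (Int.toNat (Int.ofNat (Nat.ldiff 32 1))) = ' '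
  rw [pvLdiff]
  decide

-- A-side: the fold computes acc ++ pvEnc cs (bits.drop i)
lemma pvFoldA (bits : List Char) (cs : List Char) :
    ∀ (acc : List Char) (i : Nat),
      (cs.foldl (pvStepA bits) (acc, i)).1 = acc ++ pvEnc cs (bits.drop i) := by
  induction cs with
  | nil => intro acc i; simp [pvEnc]
  | cons c cs ih =>
    intro acc i
    by_cases hc : c = ' '
    · subst hc
      by_cases hi : i < bits.length
      · have hdrop : bits.drop i = bits[i] :: bits.drop (i + 1) :=
          List.drop_eq_getElem_cons hi
        have hgetD : bits.getD i ' ' = bits[i] := List.getD_eq_getElem bits ' ' hi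
        rw [List.foldl_cons]
        show (cs.foldl (pvStepA bits) (pvStepA bits (acc, i) ' ')).1 = _
        rw [hdrop]
        simp only [pvStepA, if_pos rfl, hi, if_pos, hgetD]
        rw [ih]
        by_cases hb : bits[i] = '1' <;>
          simp [pvEnc, hb, pvCharOr, pvCharAnd]
      · have hdrop : bits.drop i = [] := List.drop_eq_nil_of_le (Nat.le_of_not_lt hi)
        rw [List.foldl_cons]
        show (cs.foldl (pvStepA bits) (pvStepA bits (acc, i) ' ')).1 = _
        simp only [pvStepA, if_pos rfl, hi, if_neg, ite_false]
        rw [ih]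
        simp [pvEnc, hdrop]
    · rw [List.foldl_cons]
      show (cs.foldl (pvStepA bits) (pvStepA bits (acc, i) c)).1 = _
      simp only [pvStepA, if_neg hc]
      rw [ih]
      simp [pvEnc, hc]

-- B-side: helper facts
lemma pvApplyBits_nil_chars (pairs : List (Char × Nat)) : pvApplyBits [] pairs = [] := by
  induction pairs with
  | nil => rfl
  | cons p ps ih =>
    show pvApplyBits (List.set [] p.2 _) ps = []
    simpa using ih

lemma pvApplyBits_shift (c : Char) (cs : List Char) (pairs : List (Char × Nat)) :
    pvApplyBits (c :: cs) (pairs.map (fun bp => (bp.1, bp.2 + 1))) =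
      c :: pvApplyBits cs pairs := by
  induction pairs generalizing cs with
  | nil => rfl
  | cons p ps ih =>
    show pvApplyBits (List.set (c :: cs) (p.2 + 1) _) (ps.map _) = _
    rw [show List.set (c :: cs) (p.2 + 1) _ = c :: List.set cs p.2 _ from rfl]
    exact ih (cs.set p.2 _)

lemma pvZip_map_succ (bits : List Char) (ps : List Nat) :
    bits.zip (ps.map (· + 1)) = (bits.zip ps).map (fun bp => (bp.1, bp.2 + 1)) := by
  induction bits generalizing ps with
  | nil => simp
  | cons b bs ih =>
    cases ps with
    | nil => simp
    | cons p ps => simp [List.zip_cons_cons, ih]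

-- B-side: the apply-bits fold computes pvEnc
lemma pvFoldB (cs : List Char) :
    ∀ (bits : List Char),
      pvApplyBits cs (bits.zip (pvSpacePositions cs)) = pvEnc cs bits := by
  induction cs with
  | nil => intro bits; simp [pvSpacePositions, pvApplyBits_nil_chars, pvEnc]
  | cons c cs ih =>
    intro bits
    by_cases hc : c = ' '
    · subst hc
      cases bits with
      | nil =>
        show pvApplyBits (' ' :: cs) [] = _
        show (' ' :: cs) = _
        simp [pvEnc, pvEnc_nil_bits]
      | cons b bs =>
        show pvApplyBits (' ' :: cs) ((b :: bs).zip (0 :: (pvSpacePositions cs).map (· + 1))) = _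
        rw [List.zip_cons_cons, pvZip_map_succ]
        show pvApplyBits (List.set (' ' :: cs) 0 _) ((bs.zip (pvSpacePositions cs)).map _) = _
        rw [show ∀ v, List.set (' ' :: cs) 0 v = v :: cs from fun _ => rfl]
        rw [pvApplyBits_shift, ih]
        by_cases hb : b = '1' <;> simp [pvEnc, hb, pvCharOr, pvCharAnd]
    · rw [show pvSpacePositions (c :: cs) = (pvSpacePositions cs).map (· + 1) by
        simp [pvSpacePositions, hc]]
      rw [pvZip_map_succ, pvApplyBits_shift, ih]
      simp [pvEnc, hc]

-- ===== VERDICT (by name: the statement is the Claim_ definition above) =====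
theorem encode_bit_sequence_spec : Claim_equal_encode_bit_sequence := by
  intro text bit_sequence _
  show _ = _
  unfold encode_bit_sequence encode_bit_sequence_alt
  rw [pvFoldA, pvFoldB]
  simp
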